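-- pv_equiv track=rewrite | github.com/ByronT14/Wordle-Solver | Wordle-Solver/wordle_solver/starter_words.py | word_coverage
-- ===== SOURCE A (Python) =====
-- def word_coverage(word_corpus):
--     word_to_word_coverage = dict()
--     for word in word_corpus:
--         words_covered = set()
--         for letter in word:
--             for new_word in word_corpus:
--                 if letter in new_word:
--                     words_covered.add(new_word)
--         word_to_word_coverage[word] = len(words_covered)
--     return word_to_word_coverage
-- ===== SOURCE B (Python) =====
-- def word_coverage(word_corpus):
--     # Inverted index letter -> set of corpus words containing it; each word's
--     # coverage is the union of the sets of its letters (no rescan of the corpus).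
--     letter_to_words = {}
--     for w in word_corpus:
--         for ch in w:
--             letter_to_words.setdefault(ch, set()).add(w)
--     empty = set()
--     result = {}
--     for w in word_corpus:
--         covered = set()
--         for ch in w:
--             covered |= letter_to_words.get(ch, empty)
--         result[w] = len(covered)
--     return result
-- ===== Notes on version B (the rewrite author's own statement) =====
-- stated objective: faster
-- what changed: Replaces A's rescan of the whole corpus for every letter of every word by a precomputed inverted index letter->set of words, so each word's coverage is a union of per-letter sets.
import Mathlib
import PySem

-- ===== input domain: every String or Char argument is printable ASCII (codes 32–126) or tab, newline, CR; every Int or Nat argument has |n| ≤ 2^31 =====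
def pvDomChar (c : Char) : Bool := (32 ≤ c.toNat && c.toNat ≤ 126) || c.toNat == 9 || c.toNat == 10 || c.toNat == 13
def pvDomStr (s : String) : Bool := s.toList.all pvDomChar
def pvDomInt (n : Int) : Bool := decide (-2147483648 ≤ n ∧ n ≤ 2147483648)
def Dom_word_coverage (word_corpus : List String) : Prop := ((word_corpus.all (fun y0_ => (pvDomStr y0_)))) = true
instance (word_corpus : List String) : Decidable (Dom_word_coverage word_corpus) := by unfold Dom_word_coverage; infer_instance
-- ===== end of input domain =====

-- B replaces A's rescan of the whole corpus for every letter of every word by an inverted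
-- index letter -> set of words built once; each word's coverage is a union of per-letter sets.

-- ===== PORT A =====
-- A: for each word, for each letter, scan the whole corpus and add every word containing the letter.
-- 'letter in new_word' (1-char needle substring test) is PySem.Chars.isIn [letter] — exact.
def word_coverage (word_corpus : List String) : List (String × Int) :=
  (word_corpus.foldl (fun d word =>
      let words_covered : PySem.Set String :=
        word.toList.foldl (fun s letter =>
          word_corpus.foldl (fun s2 new_word =>
            if PySem.Chars.isIn [letter] new_word.toList then PySem.Set.add s2 new_word else s2) s)
          PySem.Set.empty
      d.insert word ((PySem.Set.len words_covered : Int)))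
    PySem.Dict.empty).items

-- ===== PORT B =====
-- letter_to_words: the inverted index, built once over the corpus
-- (setdefault(ch, set()).add(w)  =  insert ch ((getD ch ∅).add w): same key position, same set).
def wcLetterIndex (word_corpus : List String) : PySem.Dict Char (PySem.Set String) :=
  word_corpus.foldl (fun d w =>
    w.toList.foldl (fun d2 ch =>
      d2.insert ch (PySem.Set.add (d2.getD ch PySem.Set.empty) w)) d)
    PySem.Dict.empty

def word_coverage_alt (word_corpus : List String) : List (String × Int) :=
  let letter_to_words := wcLetterIndex word_corpus
  (word_corpus.foldl (fun r w =>
      let covered : PySem.Set String :=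
        w.toList.foldl (fun s ch =>
          PySem.Set.union s (letter_to_words.getD ch PySem.Set.empty)) PySem.Set.empty
      r.insert w ((PySem.Set.len covered : Int)))
    PySem.Dict.empty).items

-- ===== PRECONDITION & SPEC =====
def Spec_word_coverage (word_corpus : List String) (out : List (String × Int)) : Prop := out = word_coverage_alt word_corpus
instance (word_corpus : List String) (out : List (String × Int)) : Decidable (Spec_word_coverage word_corpus out) := by unfold Spec_word_coverage; infer_instance

-- ===== CLAIM (what is proved, stated in full; the proofs are below) =====
def Claim_equal_word_coverage : Prop := ∀ (word_corpus : List String), Dom_word_coverage word_corpus → Spec_word_coverage word_corpus (word_coverage word_corpus)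

-- ===== LEMMAS AND PROOFS =====

-- a 1-char substring test is char membership
theorem wc_isIn_singleton (c : Char) (l : List Char) :
    PySem.Chars.isIn [c] l = true ↔ c ∈ l := by
  rw [PySem.Chars.isIn_iff_infix]
  constructor
  · rintro ⟨p, q, h⟩; subst h; simp
  · intro h
    obtain ⟨p, q, h⟩ := List.append_of_mem h
    exact ⟨p, q, by simp [h]⟩

-- A's inner corpus scan: what ends up in the set
theorem wc_scan_mem (corpus : List String) (letter : Char) (s : PySem.Set String) (x : String) :
    x ∈ corpus.foldl (fun s2 nw =>
        if PySem.Chars.isIn [letter] nw.toList then PySem.Set.add s2 nw else s2) s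
    ↔ x ∈ s ∨ (x ∈ corpus ∧ letter ∈ x.toList) := by
  induction corpus generalizing s with
  | nil => simp
  | cons a t ih =>
    simp only [List.foldl_cons, ih, List.mem_cons]
    by_cases h : letter ∈ a.toList
    · simp only [(wc_isIn_singleton letter a.toList).mpr h, if_true, PySem.Set.mem_add]
      constructor
      · rintro (⟨h1 | rfl⟩ | ⟨h1, h2⟩)
        · exact Or.inl h1
        · exact Or.inr ⟨Or.inl rfl, h⟩
        · exact Or.inr ⟨Or.inr h1, h2⟩
      · rintro (h1 | ⟨rfl | h1, h2⟩)
        · exact Or.inl (Or.inl h1)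
        · exact Or.inl (Or.inr rfl)
        · exact Or.inr ⟨h1, h2⟩
    · have h' : PySem.Chars.isIn [letter] a.toList = false := by
        by_contra hc
        exact h ((wc_isIn_singleton letter a.toList).mp (by simpa using hc))
      simp only [h']
      constructor
      · rintro (h1 | ⟨h1, h2⟩)
        · exact Or.inl h1
        · exact Or.inr ⟨Or.inr h1, h2⟩
      · rintro (h1 | ⟨rfl | h1, h2⟩)
        · exact Or.inl h1
        · exact absurd h2 h
        · exact Or.inr ⟨h1, h2⟩

theorem wc_scan_nodup (corpus : List String) (letter : Char) (s : PySem.Set String)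
    (hs : s.Nodup) :
    (corpus.foldl (fun s2 nw =>
        if PySem.Chars.isIn [letter] nw.toList then PySem.Set.add s2 nw else s2) s).Nodup := by
  induction corpus generalizing s with
  | nil => exact hs
  | cons a t ih =>
    simp only [List.foldl_cons]
    split
    · exact ih _ (PySem.Set.nodup_add _ _ hs)
    · exact ih _ hs

-- A's per-word set: membership
theorem wc_covA_mem (corpus : List String) (chars : List Char) (s : PySem.Set String) (x : String) :
    x ∈ chars.foldl (fun s letter =>
        corpus.foldl (fun s2 nw =>
          if PySem.Chars.isIn [letter] nw.toList then PySem.Set.add s2 nw else s2) s) s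
    ↔ x ∈ s ∨ ∃ c ∈ chars, x ∈ corpus ∧ c ∈ x.toList := by
  induction chars generalizing s with
  | nil => simp
  | cons c t ih =>
    simp only [List.foldl_cons, ih, wc_scan_mem, List.mem_cons]
    constructor
    · rintro ((h1 | h1) | ⟨c', hc', h2⟩)
      · exact Or.inl h1
      · exact Or.inr ⟨c, Or.inl rfl, h1⟩
      · exact Or.inr ⟨c', Or.inr hc', h2⟩
    · rintro (h1 | ⟨c', (rfl | hc'), h2⟩)
      · exact Or.inl (Or.inl h1)
      · exact Or.inl (Or.inr h2)
      · exact Or.inr ⟨c', hc', h2⟩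

theorem wc_covA_nodup (corpus : List String) (chars : List Char) (s : PySem.Set String)
    (hs : s.Nodup) :
    (chars.foldl (fun s letter =>
        corpus.foldl (fun s2 nw =>
          if PySem.Chars.isIn [letter] nw.toList then PySem.Set.add s2 nw else s2) s) s).Nodup := by
  induction chars generalizing s with
  | nil => exact hs
  | cons c t ih => exact ih _ (wc_scan_nodup corpus c s hs)

-- the inverted index: one word's letters folded in
theorem wc_idx_char (w : String) (chars : List Char) (d : PySem.Dict Char (PySem.Set String))
    (ch : Char) (x : String) :
    x ∈ (chars.foldl (fun d2 c =>
        d2.insert c (PySem.Set.add (d2.getD c PySem.Set.empty) w)) d).getD ch PySem.Set.empty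
    ↔ x ∈ d.getD ch PySem.Set.empty ∨ (ch ∈ chars ∧ x = w) := by
  induction chars generalizing d with
  | nil => simp
  | cons c t ih =>
    simp only [List.foldl_cons, ih, List.mem_cons, PySem.Dict.getD_insert]
    split_ifs with h
    · subst h
      simp only [PySem.Set.mem_add]
      tauto
    · tauto

-- the inverted index over the whole corpus
theorem wc_idx_mem_aux (l : List String) (d : PySem.Dict Char (PySem.Set String))
    (ch : Char) (x : String) :
    x ∈ (l.foldl (fun d w =>
        w.toList.foldl (fun d2 c =>
          d2.insert c (PySem.Set.add (d2.getD c PySem.Set.empty) w)) d) d).getD ch PySem.Set.empty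
    ↔ x ∈ d.getD ch PySem.Set.empty ∨ (x ∈ l ∧ ch ∈ x.toList) := by
  induction l generalizing d with
  | nil => simp
  | cons a t ih =>
    simp only [List.foldl_cons, ih, wc_idx_char, List.mem_cons]
    constructor
    · rintro ((h1 | ⟨h1, rfl⟩) | ⟨h1, h2⟩)
      · exact Or.inl h1
      · exact Or.inr ⟨Or.inl rfl, h1⟩
      · exact Or.inr ⟨Or.inr h1, h2⟩
    · rintro (h1 | ⟨rfl | h1, h2⟩)
      · exact Or.inl (Or.inl h1)
      · exact Or.inl (Or.inr ⟨h2, rfl⟩)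
      · exact Or.inr ⟨h1, h2⟩

theorem wc_idx_mem (corpus : List String) (ch : Char) (x : String) :
    x ∈ (wcLetterIndex corpus).getD ch PySem.Set.empty ↔ x ∈ corpus ∧ ch ∈ x.toList := by
  unfold wcLetterIndex
  rw [wc_idx_mem_aux]
  simp [PySem.Set.empty]

-- B's per-word set: membership and nodup
theorem wc_covB_mem (idx : PySem.Dict Char (PySem.Set String)) (chars : List Char)
    (s : PySem.Set String) (x : String) :
    x ∈ chars.foldl (fun s ch => PySem.Set.union s (idx.getD ch PySem.Set.empty)) s
    ↔ x ∈ s ∨ ∃ c ∈ chars, x ∈ idx.getD c PySem.Set.empty := by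
  induction chars generalizing s with
  | nil => simp
  | cons c t ih =>
    simp only [List.foldl_cons, ih, PySem.Set.mem_union, List.mem_cons]
    constructor
    · rintro ((h1 | h1) | ⟨c', hc', h2⟩)
      · exact Or.inl h1
      · exact Or.inr ⟨c, Or.inl rfl, h1⟩
      · exact Or.inr ⟨c', Or.inr hc', h2⟩
    · rintro (h1 | ⟨c', (rfl | hc'), h2⟩)
      · exact Or.inl (Or.inl h1)
      · exact Or.inl (Or.inr h2)
      · exact Or.inr ⟨c', hc', h2⟩

theorem wc_covB_nodup (idx : PySem.Dict Char (PySem.Set String)) (chars : List Char)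
    (s : PySem.Set String) (hs : s.Nodup) :
    (chars.foldl (fun s ch => PySem.Set.union s (idx.getD ch PySem.Set.empty)) s).Nodup := by
  induction chars generalizing s with
  | nil => exact hs
  | cons c t ih => exact ih _ (PySem.Set.nodup_union _ _ hs)

-- same elements, both nodup: same size, hence the same per-word value
theorem wc_val_eq (corpus : List String) (w : String) :
    (PySem.Set.len (w.toList.foldl (fun s letter =>
        corpus.foldl (fun s2 nw =>
          if PySem.Chars.isIn [letter] nw.toList then PySem.Set.add s2 nw else s2) s)
        PySem.Set.empty) : Int)
    = (PySem.Set.len (w.toList.foldl (fun s ch =>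
        PySem.Set.union s ((wcLetterIndex corpus).getD ch PySem.Set.empty)) PySem.Set.empty) : Int) := by
  have hperm : (w.toList.foldl (fun s letter =>
      corpus.foldl (fun s2 nw =>
        if PySem.Chars.isIn [letter] nw.toList then PySem.Set.add s2 nw else s2) s)
      PySem.Set.empty).Perm
      (w.toList.foldl (fun s ch =>
        PySem.Set.union s ((wcLetterIndex corpus).getD ch PySem.Set.empty)) PySem.Set.empty) := by
    rw [List.perm_ext_iff_of_nodup
      (wc_covA_nodup corpus w.toList PySem.Set.empty (by simp [PySem.Set.empty]))
      (wc_covB_nodup _ w.toList PySem.Set.empty (by simp [PySem.Set.empty]))]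
    intro x
    rw [wc_covA_mem, wc_covB_mem]
    simp only [wc_idx_mem]
  exact congrArg Int.ofNat hperm.length_eq

-- ===== VERDICT (by name: the statement is the Claim_ definition above) =====
theorem word_coverage_spec : Claim_equal_word_coverage := by
  intro corpus _
  show word_coverage corpus = word_coverage_alt corpus
  unfold word_coverage word_coverage_alt
  simp only []
  congr 1
  apply PySem.List.foldl_congr_mem
  intro acc w _
  rw [wc_val_eq corpus w]
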